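-- pv_equiv track=rewrite | github.com/Zatt010/8Puzzle | Juego.py | es_resoluble
-- ===== SOURCE A (Python) =====
-- def es_resoluble(estado):
--     inversions = 0
--     estado_sin_cero = [num for num in estado if num != 0]
--     for i in range(len(estado_sin_cero)):
--         for j in range(i + 1, len(estado_sin_cero)):
--             if estado_sin_cero[i] > estado_sin_cero[j]:
--                 inversions += 1
--     return inversions % 2 == 0
-- ===== SOURCE B (Python) =====
-- def es_resoluble(estado):
--     # Merge-sort inversion counting: O(n log n) instead of A's O(n^2) nested scan.
--     xs = [x for x in estado if x != 0]
--
--     def sort_count(a):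
--         if len(a) <= 1:
--             return a, 0
--         mid = len(a) // 2
--         l, cl = sort_count(a[:mid])
--         r, cr = sort_count(a[mid:])
--         merged = []
--         inv = cl + cr
--         i = j = 0
--         while i < len(l) and j < len(r):
--             if l[i] <= r[j]:
--                 merged.append(l[i]); i += 1
--             else:
--                 merged.append(r[j]); inv += len(l) - i; j += 1
--         merged.extend(l[i:])
--         merged.extend(r[j:])
--         return merged, inv
--
--     return sort_count(xs)[1] % 2 == 0
-- ===== Notes on version B (the rewrite author's own statement) =====
-- stated objective: faster
-- what changed: Replaced the nested-index O(n^2) inversion scan with merge-sort inversion counting (count cross inversions while merging sorted halves), then test the same parity.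
import Mathlib
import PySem

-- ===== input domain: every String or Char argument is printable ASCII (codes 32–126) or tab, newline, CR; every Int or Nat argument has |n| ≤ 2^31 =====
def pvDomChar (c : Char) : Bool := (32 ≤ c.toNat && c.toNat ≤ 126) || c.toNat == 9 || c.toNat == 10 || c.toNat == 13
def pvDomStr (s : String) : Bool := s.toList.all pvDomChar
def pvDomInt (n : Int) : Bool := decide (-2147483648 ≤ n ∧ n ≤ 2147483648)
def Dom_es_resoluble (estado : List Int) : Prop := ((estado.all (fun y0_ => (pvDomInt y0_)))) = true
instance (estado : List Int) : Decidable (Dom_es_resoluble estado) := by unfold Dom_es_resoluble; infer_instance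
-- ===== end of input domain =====

-- B replaces A's nested-index O(n^2) inversion scan with merge-sort inversion counting (objective: faster).


-- ===== PORT A =====
def es_resoluble (estado : List Int) : Bool :=
  let estado_sin_cero := estado.filter (fun num => decide (num ≠ 0))
  let inversions : Int :=
    (PySem.List.pyRange 0 (estado_sin_cero.length : Int) 1).foldl (fun inv i =>
      (PySem.List.pyRange (i + 1) (estado_sin_cero.length : Int) 1).foldl (fun inv j =>
        if PySem.List.pyGetD estado_sin_cero j 0 < PySem.List.pyGetD estado_sin_cero i 0
        then inv + 1 else inv) inv) 0
  decide (PySem.Int.mod inversions 2 = 0)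

-- ===== PORT B =====
-- merge while-loop of Source B: consume the two sorted runs, counting len(l)-i when an element of r is taken
def pvMerge : List Int → List Int → List Int × Int
  | [], r => (r, 0)
  | x :: l, [] => (x :: l, 0)
  | x :: l, y :: r =>
    if x ≤ y then
      let p := pvMerge l (y :: r)
      (x :: p.1, p.2)
    else
      let p := pvMerge (x :: l) r
      (y :: p.1, p.2 + ((x :: l).length : Int))

-- sort_count of Source B: a[:mid] / a[mid:] with mid = len(a)//2 are take/drop at the Nat division
-- a.length / 2 (exact: len(a) ≥ 0, so Python's floor // agrees with Nat division)
def pvSortCount (a : List Int) : List Int × Int :=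
  if _h : a.length ≤ 1 then (a, 0)
  else
    let pl := pvSortCount (a.take (a.length / 2))
    let pr := pvSortCount (a.drop (a.length / 2))
    let pm := pvMerge pl.1 pr.1
    (pm.1, pl.2 + pr.2 + pm.2)
termination_by a.length
decreasing_by
  · simp; omega
  · simp; omega

def es_resoluble_alt (estado : List Int) : Bool :=
  let xs := estado.filter (fun x => decide (x ≠ 0))
  decide (PySem.Int.mod (pvSortCount xs).2 2 = 0)

-- ===== PRECONDITION & SPEC =====
def Spec_es_resoluble (estado : List Int) (out : Bool) : Prop := out = es_resoluble_alt estado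
instance (estado : List Int) (out : Bool) : Decidable (Spec_es_resoluble estado out) := by unfold Spec_es_resoluble; infer_instance

-- ===== CLAIM (what is proved, stated in full; the proofs are below) =====
def Claim_equal_es_resoluble : Prop := ∀ (estado : List Int), Dom_es_resoluble estado → Spec_es_resoluble estado (es_resoluble estado)

-- ===== LEMMAS AND PROOFS =====

def invNat : List Int → Nat
  | [] => 0
  | x :: xs => xs.countP (fun y => decide (y < x)) + invNat xs

def crossN (l r : List Int) : Nat :=
  (r.map (fun y => l.countP (fun x => decide (y < x)))).sum


theorem crossN_cons_left (x : Int) (l r : List Int) :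
    crossN (x :: l) r = crossN l r + r.countP (fun y => decide (y < x)) := by
  unfold crossN
  simp only [List.countP_cons, List.sum_map_add]
  congr 1
  rw [← PySem.List.sum_map_ite_one_zero_nat' (fun y => y < x) r]
  exact congrArg List.sum (List.map_congr_left (by intro z _; simp))

theorem invNat_append (l r : List Int) :
    invNat (l ++ r) = invNat l + invNat r + crossN l r := by
  induction l with
  | nil => simp [invNat, crossN]
  | cons x l ih =>
    simp only [List.cons_append, invNat, ih, List.countP_append, crossN_cons_left]
    omega

theorem crossN_perm_left {l l' : List Int} (h : l.Perm l') (r : List Int) :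
    crossN l r = crossN l' r := by
  unfold crossN
  congr 1
  apply List.map_congr_left
  intro y _
  exact h.countP_eq _

theorem crossN_perm_right (l : List Int) {r r' : List Int} (h : r.Perm r') :
    crossN l r = crossN l r' := by
  exact (h.map _).sum_eq

theorem pvMerge_spec : ∀ (l r : List Int), l.Pairwise (· ≤ ·) → r.Pairwise (· ≤ ·) →
    (pvMerge l r).1.Pairwise (· ≤ ·) ∧ (pvMerge l r).1.Perm (l ++ r) ∧
      (pvMerge l r).2 = (crossN l r : Int) := by
  intro l r hl hr
  induction l, r using pvMerge.induct with
  | case1 r => simpa [pvMerge, crossN] using hr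
  | case2 x l => simp [pvMerge, crossN, hl]
  | case3 x l y r hxy ih =>
    rw [List.pairwise_cons] at hl hr
    obtain ⟨hS, hP, hC⟩ := ih hl.2 (List.pairwise_cons.mpr hr)
    simp only [pvMerge, if_pos hxy]
    have hxall : ∀ b ∈ l ++ y :: r, x ≤ b := by
      intro b hb
      rcases List.mem_append.mp hb with h | h
      · exact hl.1 b h
      · rcases List.mem_cons.mp h with h | h
        · omega
        · exact le_trans hxy (hr.1 b h)
    refine ⟨?_, ?_, ?_⟩
    · exact List.pairwise_cons.mpr ⟨fun b hb => hxall b (hP.mem_iff.mp hb), hS⟩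
    · exact hP.cons x
    · rw [hC]
      congr 1
      unfold crossN
      congr 1
      apply List.map_congr_left
      intro z hz
      rw [List.countP_cons]
      have hzx : ¬ z < x := by
        have := hxall z (List.mem_append.mpr (Or.inr hz))
        omega
      simp [hzx]
  | case4 x l y r hxy ih =>
    rw [List.pairwise_cons] at hl hr
    obtain ⟨hS, hP, hC⟩ := ih (List.pairwise_cons.mpr hl) hr.2
    simp only [pvMerge, if_neg hxy]
    have hyall : ∀ b ∈ x :: l, y < b := by
      intro b hb
      rcases List.mem_cons.mp hb with h | h
      · omega
      · have := hl.1 b h; omega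
    refine ⟨?_, ?_, ?_⟩
    · refine List.pairwise_cons.mpr ⟨fun b hb => ?_, hS⟩
      rcases List.mem_append.mp (hP.mem_iff.mp hb) with h | h
      · exact le_of_lt (hyall b h)
      · exact hr.1 b h
    · exact (hP.cons y).trans List.perm_middle.symm
    · rw [hC]
      unfold crossN
      simp only [List.map_cons, List.sum_cons]
      have hcnt : List.countP (fun x_1 => decide (y < x_1)) (x :: l) = (x :: l).length := by
        apply List.countP_eq_length.mpr
        intro b hb
        simp [hyall b hb]
      push_cast [hcnt]
      ring

theorem pvSortCount_spec : ∀ (a : List Int),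
    (pvSortCount a).1.Pairwise (· ≤ ·) ∧ (pvSortCount a).1.Perm a ∧
      (pvSortCount a).2 = (invNat a : Int) := by
  intro a
  induction a using pvSortCount.induct with
  | case1 a h =>
    rw [pvSortCount, dif_pos h]
    match a, h with
    | [], _ => simp [invNat]
    | [z], _ => simp [invNat]
  | case2 a h ihl ihr =>
    rw [pvSortCount, dif_neg h]
    obtain ⟨sl, pl, cl⟩ := ihl
    obtain ⟨sr, pr, cr⟩ := ihr
    obtain ⟨sm, pm, cm⟩ := pvMerge_spec _ _ sl sr
    refine ⟨sm, ?_, ?_⟩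
    · exact pm.trans (by exact (pl.append pr).trans (by rw [List.take_append_drop]))
    · simp only [cl, cr, cm]
      rw [crossN_perm_left pl _, crossN_perm_right _ pr]
      have := invNat_append (a.take (a.length / 2)) (a.drop (a.length / 2))
      rw [List.take_append_drop] at this
      rw [this]
      push_cast
      ring

theorem pyGetD_cons_shift (x : Int) (xs : List Int) (i : Int) (h : 0 ≤ i) (d : Int) :
    PySem.List.pyGetD (x :: xs) (i + 1) d = PySem.List.pyGetD xs i d := by
  obtain ⟨n, rfl⟩ := Int.eq_ofNat_of_zero_le h
  have : (n : Int) + 1 = ((n + 1 : Nat) : Int) := by push_cast; ring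
  rw [this, PySem.List.pyGetD_natCast, PySem.List.pyGetD_natCast]
  simp

theorem pyRange_succ_shift (a b : Int) :
    PySem.List.pyRange (a + 1) (b + 1) 1 = (PySem.List.pyRange a b 1).map (· + 1) := by
  rw [PySem.List.pyRange_one, PySem.List.pyRange_one, List.map_map]
  have : b + 1 - (a + 1) = b - a := by ring
  rw [this]
  apply List.map_congr_left
  intro k _
  simp [Function.comp]
  ring

theorem a_loop (esc : List Int) : ∀ c : Int,
    (PySem.List.pyRange 0 (esc.length : Int) 1).foldl (fun inv i =>
      (PySem.List.pyRange (i + 1) (esc.length : Int) 1).foldl (fun inv j =>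
        if PySem.List.pyGetD esc j 0 < PySem.List.pyGetD esc i 0
        then inv + 1 else inv) inv) c = c + (invNat esc : Int) := by
  induction esc with
  | nil => intro c; simp [PySem.List.pyRange_one_eq_nil, invNat]
  | cons x xs ih =>
    intro c
    have hlen : ((x :: xs).length : Int) = (xs.length : Int) + 1 := by
      push_cast [List.length_cons]; ring
    rw [PySem.List.pyRange_one_cons (by rw [hlen]; positivity), List.foldl_cons,
      PySem.List.pyGetD_zero_cons]
    have h1 := PySem.List.foldl_pyRange_pyGetD' (x :: xs) 0
      (fun acc y => if y < x then acc + 1 else acc) c (a := 0 + 1) (by norm_num)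
    rw [show List.drop ((0:Int) + 1).toNat (x :: xs) = xs from by norm_num] at h1
    simp only [h1]
    rw [PySem.List.foldl_ite_add_one (fun y => y < x) xs c]
    rw [hlen, pyRange_succ_shift 0 (xs.length : Int), List.foldl_map]
    refine (PySem.List.foldl_congr_mem _ _ (fun inv i =>
      (PySem.List.pyRange (i + 1) (xs.length : Int) 1).foldl (fun inv j =>
        if PySem.List.pyGetD xs j 0 < PySem.List.pyGetD xs i 0
        then inv + 1 else inv) inv) _ ?_).trans ?_
    · intro acc i hi
      have hi0 : 0 ≤ i := (PySem.List.mem_pyRange_one.mp hi).1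
      rw [pyGetD_cons_shift x xs i hi0 0,
        pyRange_succ_shift (i + 1) (xs.length : Int), List.foldl_map]
      apply PySem.List.foldl_congr_mem
      intro acc' j hj
      have hj0 : 0 ≤ j := by
        have := (PySem.List.mem_pyRange_one.mp hj).1; omega
      rw [pyGetD_cons_shift x xs j hj0 0]
    · rw [ih]
      simp only [invNat]
      push_cast
      ring

-- ===== VERDICT (by name: the statement is the Claim_ definition above) =====
theorem es_resoluble_spec : Claim_equal_es_resoluble := by
  intro estado _
  unfold Spec_es_resoluble
  simp only [es_resoluble, es_resoluble_alt]
  rw [a_loop, (pvSortCount_spec _).2.2, zero_add]
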